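-- pv_equiv track=rewrite | github.com/RiddleHe/vllm_as_formalizer | scripts/eval/calculate_precision_recall.py | map_typed_objects
-- ===== SOURCE A (Python) =====
-- def map_typed_objects(pred_objs_dict, mapping):
--     out, unmapped = set(), 0
--     for pred_name, pred_type in pred_objs_dict.items():
--         if pred_name in mapping:
--             out.add((mapping[pred_name], pred_type))
--         else:
--             unmapped += 1
--     return out, unmapped
-- ===== SOURCE B (Python) =====
-- def map_typed_objects(pred_objs_dict, mapping):
--     def solve(items):
--         if len(items) == 0:
--             return set(), 0
--         if len(items) == 1:
--             name, typ = items[0]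
--             if name in mapping:
--                 return {(mapping[name], typ)}, 0
--             return set(), 1
--         mid = len(items) // 2
--         left_out, left_un = solve(items[:mid])
--         right_out, right_un = solve(items[mid:])
--         return left_out | right_out, left_un + right_un
--     return solve(list(pred_objs_dict.items()))
-- ===== Notes on version B (the rewrite author's own statement) =====
-- stated objective: alternative
-- what changed: Replaces the single left-to-right fold maintaining a growing set and a miss counter by a divide-and-conquer recursion: the item list is split in half, each half is solved independently, and the two partial results are combined with set union and count addition.
import Mathlib
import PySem

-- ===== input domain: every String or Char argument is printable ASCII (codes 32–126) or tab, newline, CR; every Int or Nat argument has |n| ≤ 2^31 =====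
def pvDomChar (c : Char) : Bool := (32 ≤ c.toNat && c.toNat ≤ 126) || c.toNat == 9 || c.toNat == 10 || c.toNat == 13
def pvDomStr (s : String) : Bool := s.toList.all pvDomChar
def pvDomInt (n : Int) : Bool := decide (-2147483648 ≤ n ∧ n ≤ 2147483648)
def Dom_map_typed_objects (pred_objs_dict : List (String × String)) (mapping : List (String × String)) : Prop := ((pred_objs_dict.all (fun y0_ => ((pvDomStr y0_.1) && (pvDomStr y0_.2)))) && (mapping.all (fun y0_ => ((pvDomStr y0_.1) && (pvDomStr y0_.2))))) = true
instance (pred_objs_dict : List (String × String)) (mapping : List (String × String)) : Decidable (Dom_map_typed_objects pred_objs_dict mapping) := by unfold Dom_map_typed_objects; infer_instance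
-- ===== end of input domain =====

-- B replaces A's single fold with set-add and a miss counter by a divide-and-conquer
-- recursion combining half-results with set union and count addition (objective: alternative).

-- ===== PORT A =====
def map_typed_objects (pred_objs_dict : List (String × String)) (mapping : List (String × String)) : (List (String × String)) × Int :=
  let m := PySem.Dict.mk mapping
  pred_objs_dict.foldl
    (fun (st : PySem.Set (String × String) × Int) item =>
      if m.contains item.1 then
        (PySem.Set.add st.1 (m.getD item.1 "", item.2), st.2)
      else
        (st.1, st.2 + 1))
    (PySem.Set.empty, (0 : Int))

-- ===== PORT B =====
-- items[:mid] / items[mid:] are ported as take/drop: exact here since 0 ≤ mid ≤ len(items).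
def mto_solveB (m : PySem.Dict String String) (items : List (String × String)) :
    PySem.Set (String × String) × Int :=
  if items.length = 0 then (PySem.Set.empty, (0 : Int))
  else if items.length = 1 then
    let it := items.head!
    if m.contains it.1 then (([(m.getD it.1 "", it.2)] : PySem.Set (String × String)), 0)
    else (PySem.Set.empty, 1)
  else
    let mid := items.length / 2
    let lres := mto_solveB m (items.take mid)
    let rres := mto_solveB m (items.drop mid)
    (PySem.Set.union lres.1 rres.1, lres.2 + rres.2)
termination_by items.length
decreasing_by
  · simp only [List.length_take]; omega
  · simp only [List.length_drop]; omega

def map_typed_objects_alt (pred_objs_dict : List (String × String)) (mapping : List (String × String)) : (List (String × String)) × Int :=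
  mto_solveB (PySem.Dict.mk mapping) pred_objs_dict

-- ===== PRECONDITION & SPEC =====
def Spec_map_typed_objects (pred_objs_dict : List (String × String)) (mapping : List (String × String)) (out : (List (String × String)) × Int) : Prop := out = map_typed_objects_alt pred_objs_dict mapping
instance (pred_objs_dict : List (String × String)) (mapping : List (String × String)) (out : (List (String × String)) × Int) : Decidable (Spec_map_typed_objects pred_objs_dict mapping out) := by unfold Spec_map_typed_objects; infer_instance

-- ===== CLAIM (what is proved, stated in full; the proofs are below) =====
def Claim_equal_map_typed_objects : Prop := ∀ (pred_objs_dict : List (String × String)) (mapping : List (String × String)), Dom_map_typed_objects pred_objs_dict mapping → Spec_map_typed_objects pred_objs_dict mapping (map_typed_objects pred_objs_dict mapping)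

-- ===== LEMMAS AND PROOFS =====

-- the mapped pairs of the items kept by the mapping
def mto_K (m : PySem.Dict String String) (l : List (String × String)) : List (String × String) :=
  (l.filter (fun it => m.contains it.1)).map (fun it => (m.getD it.1 "", it.2))

-- the number of items the mapping misses
def mto_miss (m : PySem.Dict String String) (l : List (String × String)) : Int :=
  ((l.filter (fun it => !m.contains it.1)).length : Int)

-- folding Set.add over a deduplicated list equals folding it over the original list
theorem mto_foldl_add_ofList {α : Type} [BEq α] [LawfulBEq α] (b : List α) :
    ∀ s : PySem.Set α, (PySem.Set.ofList b).foldl PySem.Set.add s = b.foldl PySem.Set.add s := by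
  induction b using List.reverseRecOn with
  | nil => intro s; rfl
  | append_singleton b' x ih =>
    intro s
    rw [PySem.Set.ofList_append_singleton, List.foldl_append]
    by_cases hx : x ∈ PySem.Set.ofList b'
    · rw [PySem.Set.add_of_mem hx, ih]
      have hxb : x ∈ b' := (PySem.Set.mem_ofList _ _).1 hx
      have hmem : x ∈ b'.foldl PySem.Set.add s := by
        have := (PySem.Set.mem_foldl_add (f := fun y : α => y) (l := b') (s := s) (y := x)).2
          (Or.inr ⟨x, hxb, rfl⟩)
        simpa using this
      simp [PySem.Set.add_of_mem hmem]
    · rw [PySem.Set.add_of_not_mem hx, List.foldl_append, ih]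

-- union of two sets built from lists = the set built from the concatenation
theorem mto_union_ofList {α : Type} [BEq α] [LawfulBEq α] (a b : List α) :
    PySem.Set.union (PySem.Set.ofList a) (PySem.Set.ofList b) = PySem.Set.ofList (a ++ b) := by
  show (PySem.Set.ofList b).foldl PySem.Set.add (PySem.Set.ofList a)
      = PySem.Set.ofList (a ++ b)
  rw [mto_foldl_add_ofList]
  rw [PySem.Set.ofList_eq_foldl, PySem.Set.ofList_eq_foldl, List.foldl_append]

-- mto_K and mto_miss distribute over list concatenation
theorem mto_K_append (m : PySem.Dict String String) (a b : List (String × String)) :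
    mto_K m (a ++ b) = mto_K m a ++ mto_K m b := by
  simp [mto_K, List.filter_append]

theorem mto_miss_append (m : PySem.Dict String String) (a b : List (String × String)) :
    mto_miss m (a ++ b) = mto_miss m a + mto_miss m b := by
  simp [mto_miss, List.filter_append]

-- B's divide-and-conquer returns the deduplicated kept pairs and the miss count
theorem mto_solveB_eq (m : PySem.Dict String String) :
    ∀ n (items : List (String × String)), items.length ≤ n →
      mto_solveB m items = (PySem.Set.ofList (mto_K m items), mto_miss m items) := by
  intro n
  induction n with
  | zero =>
    intro items h
    have : items = [] := List.eq_nil_of_length_eq_zero (Nat.le_zero.1 h)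
    subst this
    rw [mto_solveB]
    simp [mto_K, mto_miss, PySem.Set.empty]
  | succ n ih =>
    intro items h
    rw [mto_solveB]
    by_cases h0 : items.length = 0
    · have : items = [] := List.eq_nil_of_length_eq_zero h0
      subst this
      simp [mto_K, mto_miss, PySem.Set.empty]
    · by_cases h1 : items.length = 1
      · match items, h1 with
        | [it], _ =>
          simp only [List.length_cons, List.length_nil, if_true, List.head!]
          by_cases hc : m.contains it.1 = true
          · simp [hc, mto_K, mto_miss, PySem.Set.ofList]
          · simp [hc, mto_K, mto_miss, PySem.Set.empty]
      · simp only [h0, h1, if_false]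
        have hlt1 : (items.take (items.length / 2)).length ≤ n := by
          simp only [List.length_take]; omega
        have hlt2 : (items.drop (items.length / 2)).length ≤ n := by
          simp only [List.length_drop]; omega
        rw [ih _ hlt1, ih _ hlt2]
        have hsplit : items = items.take (items.length / 2) ++ items.drop (items.length / 2) :=
          (List.take_append_drop _ _).symm
        rw [Prod.mk.injEq]
        constructor
        · rw [mto_union_ofList, ← mto_K_append, List.take_append_drop]
        · rw [← mto_miss_append, List.take_append_drop]

-- A's fold, characterised: set-adds over the kept mapped pairs, counter = misses
theorem mto_foldA (m : PySem.Dict String String) (pred : List (String × String))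
    (s : PySem.Set (String × String)) (u : Int) :
    pred.foldl
      (fun (st : PySem.Set (String × String) × Int) item =>
        if m.contains item.1 then
          (PySem.Set.add st.1 (m.getD item.1 "", item.2), st.2)
        else
          (st.1, st.2 + 1)) (s, u)
    = ((mto_K m pred).foldl PySem.Set.add s, u + mto_miss m pred) := by
  induction pred generalizing s u with
  | nil => simp [mto_K, mto_miss]
  | cons hd tl ih =>
    by_cases h : m.contains hd.1 = true
    · simp only [List.foldl_cons, mto_K, mto_miss, List.filter_cons, h, Bool.not_true,
        if_true, if_false, Bool.false_eq_true, List.map_cons] at *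
      rw [ih]
    · simp only [Bool.not_eq_true] at h
      simp only [List.foldl_cons, mto_K, mto_miss, List.filter_cons, h, Bool.not_false,
        if_true, if_false, Bool.false_eq_true] at *
      rw [ih]
      rw [Prod.mk.injEq]
      refine ⟨rfl, ?_⟩
      simp only [List.length_cons]
      push_cast
      ring

-- ===== VERDICT (by name: the statement is the Claim_ definition above) =====
theorem map_typed_objects_spec : Claim_equal_map_typed_objects := by
  intro pred mapping _hdom
  unfold Spec_map_typed_objects map_typed_objects map_typed_objects_alt
  rw [mto_foldA, mto_solveB_eq (PySem.Dict.mk mapping) pred.length pred le_rfl,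
    PySem.Set.ofList_eq_foldl]
  simp [PySem.Set.empty]
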